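-- pv_equiv track=rewrite | github.com/CAU-COE-VEICLab/Vision-Cognitive-Neural-Networks | models/memory.py | setStatisticFilter
-- ===== SOURCE A (Python) =====
-- def setStatisticFilter(ablation_strategy, threshold_strategy1, threshold_strategy2, scale=4):
--     fib_sequence_strategy1 = []
--     fib_sequence_strategy2 = []
--     next_index = 1
--     tmp_index = 0
--     while tmp_index <= threshold_strategy1:
--         if next_index <= 3:
--             tmp = [2 * next_index, next_index]
--             tmp_index = next_index
--             if tmp_index > threshold_strategy1:
--                 break
--         else:
--             x = 2*next_index-3
--             tmp = [2 * x, x]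
--             tmp_index = x
--             if tmp_index > threshold_strategy1:
--                 break
--         fib_sequence_strategy1.append(tmp)
--         next_index += 1
--
--     next_index -= 1
--     number_strategy1 = next_index
--
--     next_index = 1
--     tmp_index = 0
--     while tmp_index <= threshold_strategy2:
--         if next_index <= 3:
--             tmp = [2 * next_index, next_index]
--             tmp_index = next_index
--             if tmp_index > threshold_strategy2:
--                 break
--         else:
--             x = 2 * next_index - 3
--             tmp = [2 * x, x]
--             tmp_index = x
--             if tmp_index > threshold_strategy2:
--                 break
--         fib_sequence_strategy2.append(tmp)
--         next_index += 1
--     next_index -= 1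
--     number_strategy2 = next_index
--
--     if ablation_strategy == 'strategy1':
--         memorybased_dim = number_strategy1
--     elif ablation_strategy == 'strategy2':
--         memorybased_dim = number_strategy2
--     else:
--         memorybased_dim = number_strategy1 + number_strategy2
--
--     return fib_sequence_strategy1, fib_sequence_strategy2, memorybased_dim
-- ===== SOURCE B (Python) =====
-- def setStatisticFilter(ablation_strategy, threshold_strategy1, threshold_strategy2, scale=4):
--     # Closed-form count of entries for a threshold, then build the list
--     # back-to-front from indices; no threshold test inside the build loop.
--     def count(th):
--         if th < 1:
--             return 0
--         if th < 5:
--             return min(th, 3)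
--         return 3 + (th - 3) // 2
--
--     def build(n):
--         rev = []
--         k = n
--         while k >= 1:
--             t = k if k <= 3 else 2 * k - 3
--             rev.append([2 * t, t])
--             k -= 1
--         return rev[::-1]
--
--     number_strategy1 = count(threshold_strategy1)
--     number_strategy2 = count(threshold_strategy2)
--     fib_sequence_strategy1 = build(number_strategy1)
--     fib_sequence_strategy2 = build(number_strategy2)
--     if ablation_strategy == 'strategy1':
--         memorybased_dim = number_strategy1
--     elif ablation_strategy == 'strategy2':
--         memorybased_dim = number_strategy2
--     else:
--         memorybased_dim = number_strategy1 + number_strategy2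
--     return fib_sequence_strategy1, fib_sequence_strategy2, memorybased_dim
-- ===== Notes on version B (the rewrite author's own statement) =====
-- stated objective: simpler
-- what changed: Replaced A's threshold-testing while-loops (mutable next_index/tmp_index with breaks) by a closed-form count of the entries (0, min(th,3), or 3+(th-3)//2) followed by a back-to-front construction of the list from the indices n..1 (appended then reversed), with no threshold comparison during the build.
import Mathlib
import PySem

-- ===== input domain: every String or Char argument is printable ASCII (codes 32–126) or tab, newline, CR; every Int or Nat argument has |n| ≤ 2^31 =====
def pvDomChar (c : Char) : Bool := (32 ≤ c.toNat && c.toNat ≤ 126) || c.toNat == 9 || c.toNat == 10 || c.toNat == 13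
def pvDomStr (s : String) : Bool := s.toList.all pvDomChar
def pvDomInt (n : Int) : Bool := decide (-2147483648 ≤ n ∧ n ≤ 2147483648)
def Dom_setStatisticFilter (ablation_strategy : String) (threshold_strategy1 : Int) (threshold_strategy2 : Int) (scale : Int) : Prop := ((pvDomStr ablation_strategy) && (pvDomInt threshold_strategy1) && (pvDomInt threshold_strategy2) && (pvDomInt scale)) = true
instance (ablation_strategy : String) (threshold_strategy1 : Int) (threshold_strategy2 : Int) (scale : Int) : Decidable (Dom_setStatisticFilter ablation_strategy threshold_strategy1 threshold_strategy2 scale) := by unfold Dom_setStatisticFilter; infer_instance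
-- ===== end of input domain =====

-- B replaces A's threshold-testing while-loops by a closed-form count of the entries
-- (0 / min(th,3) / 3+(th-3)//2) followed by a back-to-front build of the list from indices;
-- objective: simpler.

-- ===== PORT A =====
-- A's while-loop: state (next_index, acc); tmp_index at each check equals the t just produced,
-- so the loop exits exactly through the two 'break's (or immediately when threshold < 0, in which
-- case the first t = 1 > threshold gives the same (acc, next_index) = ([], 1)).
def pvLoopA (th n : Int) (acc : List (List Int)) : List (List Int) × Int :=
  if n ≤ 3 then
    if n > th then (acc, n)
    else pvLoopA th (n + 1) (acc ++ [[2 * n, n]])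
  else
    if 2 * n - 3 > th then (acc, n)
    else pvLoopA th (n + 1) (acc ++ [[2 * (2 * n - 3), 2 * n - 3]])
termination_by (th + 4 - n).toNat
decreasing_by all_goals omega

def setStatisticFilter (ablation_strategy : String) (threshold_strategy1 : Int) (threshold_strategy2 : Int) (scale : Int) : List (List Int) × List (List Int) × Int :=
  let r1 := pvLoopA threshold_strategy1 1 []
  let fib_sequence_strategy1 := r1.1
  let number_strategy1 := r1.2 - 1
  let r2 := pvLoopA threshold_strategy2 1 []
  let fib_sequence_strategy2 := r2.1
  let number_strategy2 := r2.2 - 1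
  let memorybased_dim :=
    if ablation_strategy == "strategy1" then number_strategy1
    else if ablation_strategy == "strategy2" then number_strategy2
    else number_strategy1 + number_strategy2
  (fib_sequence_strategy1, fib_sequence_strategy2, memorybased_dim)

-- ===== PORT B =====
-- closed-form count of entries (Source B's count)
def pvCount (th : Int) : Int :=
  if th < 1 then 0
  else if th < 5 then min th 3
  else 3 + PySem.Int.floordiv (th - 3) 2

-- Source B's build: descending while-loop k = n, n-1, …, 1 appending the k-th entry to rev
def pvBuildRev (k : Nat) (rev : List (List Int)) : List (List Int) :=
  match k with
  | 0 => rev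
  | Nat.succ k' =>
      let kk : Int := (k' + 1 : Nat)
      let t : Int := if kk ≤ 3 then kk else 2 * kk - 3
      pvBuildRev k' (rev ++ [[2 * t, t]])

-- rev[::-1]: full reverse slice, exactly List.reverse
def pvBuild (n : Nat) : List (List Int) := (pvBuildRev n []).reverse

def setStatisticFilter_alt (ablation_strategy : String) (threshold_strategy1 : Int) (threshold_strategy2 : Int) (scale : Int) : List (List Int) × List (List Int) × Int :=
  let number_strategy1 := pvCount threshold_strategy1
  let number_strategy2 := pvCount threshold_strategy2
  let fib_sequence_strategy1 := pvBuild number_strategy1.toNat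
  let fib_sequence_strategy2 := pvBuild number_strategy2.toNat
  let memorybased_dim :=
    if ablation_strategy == "strategy1" then number_strategy1
    else if ablation_strategy == "strategy2" then number_strategy2
    else number_strategy1 + number_strategy2
  (fib_sequence_strategy1, fib_sequence_strategy2, memorybased_dim)

-- ===== PRECONDITION & SPEC =====
def Spec_setStatisticFilter (ablation_strategy : String) (threshold_strategy1 : Int) (threshold_strategy2 : Int) (scale : Int) (out : List (List Int) × List (List Int) × Int) : Prop := out = setStatisticFilter_alt ablation_strategy threshold_strategy1 threshold_strategy2 scale
instance (ablation_strategy : String) (threshold_strategy1 : Int) (threshold_strategy2 : Int) (scale : Int) (out : List (List Int) × List (List Int) × Int) : Decidable (Spec_setStatisticFilter ablation_strategy threshold_strategy1 threshold_strategy2 scale out) := by unfold Spec_setStatisticFilter; infer_instance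

-- ===== CLAIM (what is proved, stated in full; the proofs are below) =====
def Claim_equal_setStatisticFilter : Prop := ∀ (ablation_strategy : String) (threshold_strategy1 : Int) (threshold_strategy2 : Int) (scale : Int), Dom_setStatisticFilter ablation_strategy threshold_strategy1 threshold_strategy2 scale → Spec_setStatisticFilter ablation_strategy threshold_strategy1 threshold_strategy2 scale (setStatisticFilter ablation_strategy threshold_strategy1 threshold_strategy2 scale)

-- ===== LEMMAS AND PROOFS =====

-- the k-th entry (proof-side view of pvBuild's body)
def pvEntry (j : Nat) : List Int :=
  let t : Int := if (j : Int) ≤ 3 then (j : Int) else 2 * j - 3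
  [2 * t, t]

lemma pvBuildRev_eq (k : Nat) (rev : List (List Int)) :
    pvBuildRev k rev = rev ++ ((List.range k).map (fun i => pvEntry (i + 1))).reverse := by
  induction k generalizing rev with
  | zero => simp [pvBuildRev]
  | succ k ih =>
      rw [pvBuildRev, ih, List.range_succ]
      simp [pvEntry]

lemma pvBuild_eq (k : Nat) :
    pvBuild k = (List.range k).map (fun i => pvEntry (i + 1)) := by
  rw [pvBuild, pvBuildRev_eq]
  simp

lemma pyRange_two_nil (a b : Int) (h : b ≤ a) : PySem.List.pyRange a b 2 = [] := by
  rw [PySem.List.pyRange_of_pos a b (by norm_num)]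
  rw [if_neg (by omega)]
  simp

lemma pyRange_two_cons (a b : Int) (h : a < b) : PySem.List.pyRange a b 2 = a :: PySem.List.pyRange (a + 2) b 2 := by
  rw [PySem.List.pyRange_of_pos a b (by norm_num), PySem.List.pyRange_of_pos (a + 2) b (by norm_num)]
  rw [if_pos h]
  by_cases h2 : a + 2 < b
  · rw [if_pos h2]
    have : ((b - a + 2 - 1) / 2).toNat = ((b - (a + 2) + 2 - 1) / 2).toNat + 1 := by omega
    rw [this, List.range_succ_eq_map]
    simp [Function.comp, List.map_map]
    intro k _
    ring
  · rw [if_neg h2]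
    have : ((b - a + 2 - 1) / 2).toNat = 1 := by omega
    rw [this]
    simp

-- characterisation of A's loop from next_index = 4 onwards
lemma pvLoopA_ge (th n : Int) (acc : List (List Int)) (h : 4 ≤ n) :
    pvLoopA th n acc =
      (acc ++ (PySem.List.pyRange (2 * n - 3) (th + 1) 2).map (fun t => [2 * t, t]),
       n + ((PySem.List.pyRange (2 * n - 3) (th + 1) 2).length : Int)) := by
  rw [pvLoopA, if_neg (by omega)]
  by_cases hb : 2 * n - 3 > th
  · rw [if_pos hb, pyRange_two_nil _ _ (by omega)]
    simp
  · rw [if_neg hb, pvLoopA_ge th (n + 1) _ (by omega)]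
    rw [pyRange_two_cons (2 * n - 3) (th + 1) (by omega)]
    have : 2 * (n + 1) - 3 = 2 * n - 3 + 2 := by ring
    rw [this]
    simp
    omega
termination_by (th + 4 - n).toNat
decreasing_by omega

lemma pvLoopA_stop (th n : Int) (acc : List (List Int)) (h3 : n ≤ 3) (h : n > th) :
    pvLoopA th n acc = (acc, n) := by
  rw [pvLoopA]
  rw [if_pos h3, if_pos h]

lemma pvLoopA_step (th n : Int) (acc : List (List Int)) (h3 : n ≤ 3) (h : ¬ n > th) :
    pvLoopA th n acc = pvLoopA th (n + 1) (acc ++ [[2 * n, n]]) := by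
  rw [pvLoopA]
  rw [if_pos h3, if_neg h]

-- A's loop result = (closed-form count, back-to-front build)
lemma pvLoopA_eq_build (th : Int) :
    pvLoopA th 1 [] = (pvBuild (pvCount th).toNat, pvCount th + 1) := by
  by_cases h1 : 1 > th
  · rw [pvLoopA_stop th 1 [] (by omega) h1]
    have hc : pvCount th = 0 := by simp [pvCount]; omega
    rw [hc]
    decide
  · have e1 : pvLoopA th 1 [] = pvLoopA th 2 [[2, 1]] := by
      rw [pvLoopA_step th 1 [] (by omega) h1]; norm_num
    by_cases h2 : 2 > th
    · have hth : th = 1 := by omega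
      subst hth
      rw [e1, pvLoopA_stop 1 2 _ (by omega) (by omega)]
      decide
    · have e2 : pvLoopA th 2 [[2, 1]] = pvLoopA th 3 [[2, 1], [4, 2]] := by
        rw [pvLoopA_step th 2 _ (by omega) h2]; norm_num
      by_cases h3 : 3 > th
      · have hth : th = 2 := by omega
        subst hth
        rw [e1, e2, pvLoopA_stop 2 3 _ (by omega) (by omega)]
        decide
      · have e3 : pvLoopA th 3 [[2, 1], [4, 2]] = pvLoopA th 4 [[2, 1], [4, 2], [6, 3]] := by
          rw [pvLoopA_step th 3 _ (by omega) h3]; norm_num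
        rw [e1, e2, e3, pvLoopA_ge th 4 _ (by omega)]
        by_cases h5 : 5 ≤ th
        · -- th ≥ 5: count = 3 + (th-3)//2 entries
          have hc : pvCount th = 3 + (th - 3) / 2 := by
            simp [pvCount]; omega
          have hm : (pvCount th).toNat = 3 + ((th - 3) / 2).toNat := by
            rw [hc]; omega
          rw [hm, hc, pvBuild_eq]
          rw [PySem.List.pyRange_of_pos (2 * 4 - 3) (th + 1) (by norm_num),
              if_pos (by omega)]
          have hlen : ((th + 1 - (2 * 4 - 3) + 2 - 1) / 2).toNat = ((th - 3) / 2).toNat := by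
            omega
          rw [hlen, Prod.mk.injEq]
          constructor
          · rw [show 3 + ((th - 3) / 2).toNat = 3 + ((th - 3) / 2).toNat from rfl,
                List.range_add]
            simp only [List.map_append, List.map_map]
            have hpre : List.map (fun i => pvEntry (i + 1)) (List.range 3)
                = [[2, 1], [4, 2], [6, 3]] := by decide
            rw [hpre]
            congr 1
            apply List.map_congr_left
            intro i _
            simp only [Function.comp]
            have : ¬ ((3 + i + 1 : Nat) : Int) ≤ 3 := by push_cast; omega
            simp only [pvEntry, if_neg this]
            push_cast
            refine List.cons_eq_cons.mpr ⟨by ring, ?_⟩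
            refine List.cons_eq_cons.mpr ⟨by ring, rfl⟩
          · simp
            omega
        · -- th ∈ {3, 4}: three entries, empty tail
          have hnil : PySem.List.pyRange (2 * 4 - 3) (th + 1) 2 = [] := by
            apply pyRange_two_nil; omega
          have hc : pvCount th = 3 := by
            simp [pvCount]; omega
          rw [hnil, hc]
          decide

-- ===== VERDICT (by name: the statement is the Claim_ definition above) =====
theorem setStatisticFilter_spec : Claim_equal_setStatisticFilter := by
  intro a th1 th2 scale _
  unfold Spec_setStatisticFilter setStatisticFilter setStatisticFilter_alt
  rw [pvLoopA_eq_build th1, pvLoopA_eq_build th2]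
  simp
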